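-- pv_equiv track=rewrite | github.com/sk-prj-genai-question-app/ai-service | src/chains/markdown_parser.py | get_question_type_from_filename
-- ===== SOURCE A (Python) =====
-- def get_question_type_from_filename(filename: str) -> str:
--     """파일명에서 문제 유형 추출"""
--     type_map = {
--         '_G.md': '문법',
--         '_V.md': '어휘',
--         '_R.md': '독해'
--     }
--     for suffix, q_type in type_map.items():
--         if filename.endswith(suffix):
--             return q_type
--     return '기타'
-- ===== SOURCE B (Python) =====
-- def get_question_type_from_filename(filename: str) -> str:
--     """파일명에서 문제 유형 추출"""
--     type_map = {
--         '_G.md': '문법',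
--         '_V.md': '어휘',
--         '_R.md': '독해'
--     }
--     return type_map.get(filename[-5:], '기타')
-- ===== Notes on version B (the rewrite author's own statement) =====
-- stated objective: simpler
-- what changed: Replaces the loop over the suffix map with repeated endswith tests by a single keyed dict lookup of the 5-character tail filename[-5:] (all keys are 5 chars), with the same default.
import Mathlib
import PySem

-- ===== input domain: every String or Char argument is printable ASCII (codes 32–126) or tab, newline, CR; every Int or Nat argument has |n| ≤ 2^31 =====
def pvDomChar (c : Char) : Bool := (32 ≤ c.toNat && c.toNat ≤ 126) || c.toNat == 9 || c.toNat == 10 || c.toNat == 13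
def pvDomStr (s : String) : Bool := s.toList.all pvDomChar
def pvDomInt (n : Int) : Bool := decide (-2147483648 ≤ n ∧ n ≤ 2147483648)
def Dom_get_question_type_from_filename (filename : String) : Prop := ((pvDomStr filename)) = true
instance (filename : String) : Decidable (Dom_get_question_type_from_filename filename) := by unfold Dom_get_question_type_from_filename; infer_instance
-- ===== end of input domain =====

-- B replaces A's endswith-loop over the suffix map by a single dict lookup keyed by the 5-char tail filename[-5:] (simpler: one lookup instead of a scan).


-- ===== PORT A =====
-- the dict's items in insertion order; the for-loop over .items() is the recursion below
def pvTypeItems : List (String × String) := [("_G.md", "문법"), ("_V.md", "어휘"), ("_R.md", "독해")]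

def pvLoopA (filename : String) : List (String × String) → String
  | [] => "기타"
  | (suffix, q_type) :: rest =>
      if PySem.Str.endswith filename suffix then q_type else pvLoopA filename rest

def get_question_type_from_filename (filename : String) : String :=
  pvLoopA filename pvTypeItems

-- ===== PORT B =====
def pvTypeMapB : PySem.Dict String String :=
  (((PySem.Dict.empty).insert "_G.md" "문법").insert "_V.md" "어휘").insert "_R.md" "독해"

def get_question_type_from_filename_alt (filename : String) : String :=
  PySem.Dict.getD pvTypeMapB (PySem.Str.slice filename (some (-5)) none) "기타"

-- ===== PRECONDITION & SPEC =====
def Spec_get_question_type_from_filename (filename : String) (out : String) : Prop := out = get_question_type_from_filename_alt filename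
instance (filename : String) (out : String) : Decidable (Spec_get_question_type_from_filename filename out) := by unfold Spec_get_question_type_from_filename; infer_instance

-- ===== CLAIM (what is proved, stated in full; the proofs are below) =====
def Claim_equal_get_question_type_from_filename : Prop := ∀ (filename : String), Dom_get_question_type_from_filename filename → Spec_get_question_type_from_filename filename (get_question_type_from_filename filename)

-- ===== LEMMAS AND PROOFS =====

-- filename.endswith(t) for a 5-character t is equality of the 5-char tail with t
theorem pv_ends5 (f t : String) (ht : t.toList.length = 5) :
    PySem.Str.endswith f t = (PySem.Str.slice f (some (-5)) none == t) := by
  rw [Bool.eq_iff_iff]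
  have hsl : (PySem.Str.slice f (some (-5)) none).toList
      = f.toList.drop (f.toList.length - 5) := by
    rw [PySem.Str.toList_slice, PySem.Chars.slice_eq_listSlice,
        PySem.List.slice_from_neg_ofNat f.toList 5 (by norm_num)]
  constructor
  · intro h
    have hsuf : t.toList <:+ f.toList := (PySem.Chars.endswith_iff _ _).mp (by simpa using h)
    have := List.suffix_iff_eq_drop.mp hsuf
    rw [ht] at this
    have : (PySem.Str.slice f (some (-5)) none).toList = t.toList := by rw [hsl]; exact this.symm
    simpa [beq_iff_eq] using String.toList_inj.mp this
  · intro h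
    have he : PySem.Str.slice f (some (-5)) none = t := by simpa [beq_iff_eq] using h
    have htl : t.toList = f.toList.drop (f.toList.length - 5) := by
      rw [← he, hsl]
    have hsuf : t.toList <:+ f.toList := List.suffix_iff_eq_drop.mpr (by rw [ht]; exact htl)
    simpa using (PySem.Chars.endswith_iff f.toList t.toList).mpr hsuf

-- ===== VERDICT (by name: the statement is the Claim_ definition above) =====
theorem get_question_type_from_filename_spec : Claim_equal_get_question_type_from_filename := by
  intro f _
  unfold Spec_get_question_type_from_filename get_question_type_from_filename
    get_question_type_from_filename_alt pvTypeItems pvTypeMapB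
  simp only [pvLoopA, pv_ends5 f "_G.md" (by decide), pv_ends5 f "_V.md" (by decide),
    pv_ends5 f "_R.md" (by decide)]
  simp [PySem.Dict.getD, PySem.Dict.get?, PySem.Dict.insert, PySem.Dict.empty]
  cases hg : ("_G.md" == PySem.Str.slice f (some (-5)) none) <;>
    cases hv : ("_V.md" == PySem.Str.slice f (some (-5)) none) <;>
      cases hr : ("_R.md" == PySem.Str.slice f (some (-5)) none) <;>
        simp only [List.find?, hg, hv, hr] <;>
          simp_all [beq_iff_eq, beq_eq_false_iff_ne, ne_comm] <;>
            split_ifs <;> simp_all
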